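-- pv_equiv track=rewrite | github.com/Adamkadaban/Competition-Programs | UCF/Online/2019/slices.py | getRealAns
-- ===== SOURCE A (Python) =====
-- def getRealAns(stuff):
--   KHJ= len([_ for _ in stuff if _=="Kelly hates Jim"])
--   JHK= len([_ for _ in stuff if _=="Jim hates Kelly"])
--   if KHJ+JHK==0:
--     return "Everything is good"
--   if KHJ>0 and JHK>0:
--     return "Their friendship is doomed"
--   if JHK>KHJ:
--     return "Jim hates Kelly"
--   if KHJ>JHK:
--     return "Kelly hates Jim"
-- ===== SOURCE B (Python) =====
-- VERDICTS = ("Everything is good", "Kelly hates Jim",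
--             "Jim hates Kelly", "Their friendship is doomed")
--
-- def getRealAns(stuff):
--   mask = 0
--   for s in stuff:
--     if s == "Kelly hates Jim":
--       mask |= 1
--     elif s == "Jim hates Kelly":
--       mask |= 2
--     if mask == 3:
--       break
--   return VERDICTS[mask]
-- ===== Notes on version B (the rewrite author's own statement) =====
-- stated objective: alternative
-- what changed: Two full counting comprehensions plus a four-way if-chain are replaced by one single pass that folds the list into a 2-bit presence mask (with early exit once both bits are set) and indexes a verdict table by the mask, eliminating the branch chain entirely.
import Mathlib
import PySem

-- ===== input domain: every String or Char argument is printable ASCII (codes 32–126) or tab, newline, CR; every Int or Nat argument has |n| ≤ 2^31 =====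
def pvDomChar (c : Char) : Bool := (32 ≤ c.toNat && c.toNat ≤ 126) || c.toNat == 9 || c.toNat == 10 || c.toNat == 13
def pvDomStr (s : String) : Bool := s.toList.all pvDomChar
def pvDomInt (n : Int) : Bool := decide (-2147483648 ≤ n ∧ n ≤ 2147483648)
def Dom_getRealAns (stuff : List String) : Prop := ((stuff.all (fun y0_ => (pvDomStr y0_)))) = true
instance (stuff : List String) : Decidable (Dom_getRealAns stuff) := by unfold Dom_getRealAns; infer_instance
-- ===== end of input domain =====

-- B folds the list in one pass into a 2-bit presence mask (early exit at 3) and indexes a verdict table, replacing A's two counting scans and if-chain (objective: alternative).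


-- ===== PORT A =====
def getRealAns (stuff : List String) : Option String :=
  let KHJ : Int := (stuff.filter (fun s => s == "Kelly hates Jim")).length
  let JHK : Int := (stuff.filter (fun s => s == "Jim hates Kelly")).length
  if KHJ + JHK == 0 then some "Everything is good"
  else if KHJ > 0 && JHK > 0 then some "Their friendship is doomed"
  else if JHK > KHJ then some "Jim hates Kelly"
  else if KHJ > JHK then some "Kelly hates Jim"
  else none

-- ===== PORT B =====
def pvVerdicts : List String :=
  ["Everything is good", "Kelly hates Jim", "Jim hates Kelly", "Their friendship is doomed"]

-- the single-pass loop of Source B: fold the mask, break as soon as it reaches 3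
def pvMask : List String → Nat → Nat
  | [], m => m
  | s :: rest, m =>
    let m' := if s = "Kelly hates Jim" then m ||| 1
              else if s = "Jim hates Kelly" then m ||| 2
              else m
    if m' = 3 then m' else pvMask rest m'

def getRealAns_alt (stuff : List String) : Option String :=
  pvVerdicts[pvMask stuff 0]?

-- ===== PRECONDITION & SPEC =====
def Spec_getRealAns (stuff : List String) (out : Option String) : Prop := out = getRealAns_alt stuff
instance (stuff : List String) (out : Option String) : Decidable (Spec_getRealAns stuff out) := by unfold Spec_getRealAns; infer_instance

-- ===== CLAIM (what is proved, stated in full; the proofs are below) =====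
def Claim_equal_getRealAns : Prop := ∀ (stuff : List String), Dom_getRealAns stuff → Spec_getRealAns stuff (getRealAns stuff)

-- ===== LEMMAS AND PROOFS =====
-- the mask computed by B's loop is exactly the pair of presence bits
theorem pvMask_eq (l : List String) : ∀ m : Nat, m < 4 →
    pvMask l m = (m ||| (if "Kelly hates Jim" ∈ l then 1 else 0))
                   ||| (if "Jim hates Kelly" ∈ l then 2 else 0) := by
  induction l with
  | nil => intro m _; simp [pvMask]
  | cons s rest ih =>
    intro m hm
    by_cases hk : s = "Kelly hates Jim"
    · subst hk
      simp only [pvMask, List.mem_cons, if_true,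
        true_or,
        show ¬("Jim hates Kelly" = "Kelly hates Jim") from by decide, false_or]
      by_cases h3 : m ||| 1 = 3
      · rw [if_pos h3, h3]
        by_cases hcr : "Jim hates Kelly" ∈ rest <;>
          by_cases hc2 : "Kelly hates Jim" ∈ rest <;>
          try simp only [hcr, hc2, if_true, if_false] <;>
          interval_cases m <;>
          (first | rfl | decide | exact absurd (by decide) h3 | simp_all)
      · rw [if_neg h3, ih _ (by interval_cases m <;> decide)]
        by_cases hcr : "Jim hates Kelly" ∈ rest <;>
          by_cases hc2 : "Kelly hates Jim" ∈ rest <;>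
          try simp only [hcr, hc2, if_true, if_false] <;>
          interval_cases m <;>
          (first | rfl | decide | exact absurd (by decide) h3 | simp_all)
    · by_cases hj : s = "Jim hates Kelly"
      · subst hj
        simp only [pvMask, List.mem_cons, if_neg hk,
          if_true, true_or, false_or,
          show ¬("Kelly hates Jim" = "Jim hates Kelly") from by decide]
        by_cases h3 : m ||| 2 = 3
        · rw [if_pos h3, h3]
          by_cases hcr : "Kelly hates Jim" ∈ rest <;>
            by_cases hc2 : "Jim hates Kelly" ∈ rest <;>
            try simp only [hcr, hc2, if_true, if_false] <;>
            interval_cases m <;>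
            (first | rfl | decide | exact absurd (by decide) h3 | simp_all)
        · rw [if_neg h3, ih _ (by interval_cases m <;> decide)]
          by_cases hcr : "Kelly hates Jim" ∈ rest <;>
            by_cases hc2 : "Jim hates Kelly" ∈ rest <;>
            try simp only [hcr, hc2, if_true, if_false] <;>
            interval_cases m <;>
            (first | rfl | decide | exact absurd (by decide) h3 | simp_all)
      · simp only [pvMask, List.mem_cons, if_neg hk, if_neg hj,
          show ("Kelly hates Jim" = s ∨ "Kelly hates Jim" ∈ rest) ↔ "Kelly hates Jim" ∈ rest
            from by simp [Ne.symm hk],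
          show ("Jim hates Kelly" = s ∨ "Jim hates Kelly" ∈ rest) ↔ "Jim hates Kelly" ∈ rest
            from by simp [Ne.symm hj]]
        by_cases h3 : m = 3
        · subst h3
          rw [if_pos rfl]
          by_cases hc1 : "Kelly hates Jim" ∈ rest <;>
            by_cases hc2 : "Jim hates Kelly" ∈ rest <;>
            simp [hc1, hc2]
        · rw [if_neg h3]
          exact ih m hm

theorem pv_count_pos {l : List String} {a : String} (h : l.contains a = true) :
    (0 : Int) < ((l.filter (fun s => s == a)).length : Int) := by
  have : a ∈ l := by simpa using h
  have : a ∈ l.filter (fun s => s == a) := by simpa using this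
  have := List.length_pos_iff.mpr (List.ne_nil_of_mem this)
  exact_mod_cast this

theorem pv_count_zero {l : List String} {a : String} (h : l.contains a = false) :
    ((l.filter (fun s => s == a)).length : Int) = 0 := by
  have hm : a ∉ l := by simpa using h
  have : l.filter (fun s => s == a) = [] := by
    rw [List.filter_eq_nil_iff]; intro x hx hb
    simp only [beq_iff_eq] at hb
    exact hm (hb ▸ hx)
  simp [this]

-- ===== VERDICT (by name: the statement is the Claim_ definition above) =====
theorem getRealAns_spec : Claim_equal_getRealAns := by
  intro stuff _
  unfold Spec_getRealAns getRealAns getRealAns_alt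
  rw [pvMask_eq stuff 0 (by decide)]
  by_cases hck : "Kelly hates Jim" ∈ stuff <;>
    by_cases hcj : "Jim hates Kelly" ∈ stuff
  · have k := pv_count_pos (l := stuff) (a := "Kelly hates Jim") (by simpa using hck)
    have j := pv_count_pos (l := stuff) (a := "Jim hates Kelly") (by simpa using hcj)
    simp only [hck, hcj, pvVerdicts]
    split_ifs <;> simp only [beq_iff_eq, decide_eq_true_eq, Bool.and_eq_true] at * <;>
      first | omega | simp_all
  · have k := pv_count_pos (l := stuff) (a := "Kelly hates Jim") (by simpa using hck)
    have j := pv_count_zero (l := stuff) (a := "Jim hates Kelly") (by simpa using hcj)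
    simp only [hck, hcj, pvVerdicts]
    split_ifs <;> simp only [beq_iff_eq, decide_eq_true_eq, Bool.and_eq_true] at * <;>
      first | omega | simp_all
  · have k := pv_count_zero (l := stuff) (a := "Kelly hates Jim") (by simpa using hck)
    have j := pv_count_pos (l := stuff) (a := "Jim hates Kelly") (by simpa using hcj)
    simp only [hck, hcj, pvVerdicts]
    split_ifs <;> simp only [beq_iff_eq, decide_eq_true_eq, Bool.and_eq_true] at * <;>
      first | omega | simp_all
  · have k := pv_count_zero (l := stuff) (a := "Kelly hates Jim") (by simpa using hck)
    have j := pv_count_zero (l := stuff) (a := "Jim hates Kelly") (by simpa using hcj)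
    simp [hck, hcj, k, j, pvVerdicts]
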